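-- pv_equiv track=rewrite | github.com/NovaRagnarok/Sourcebound | src/source_aware_worldbuilding/services/research.py | _normalize_canonical_path
-- ===== SOURCE A (Python) =====
-- _DEFAULT_PAGE_NAMES = {
--     "index",
--     "index.html",
--     "index.htm",
--     "default",
--     "default.html",
--     "default.htm",
--     "default.aspx",
-- }
--
-- def _normalize_canonical_path(path: str) -> str:
--     normalized = path or "/"
--     if normalized != "/" and normalized.endswith("/"):
--         normalized = normalized.rstrip("/")
--     lowered = normalized.lower()
--     if lowered in {f"/{item}" for item in _DEFAULT_PAGE_NAMES}:
--         return "/"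
--     for page_name in _DEFAULT_PAGE_NAMES:
--         if lowered.endswith(f"/{page_name}"):
--             normalized = normalized[: -(len(page_name) + 1)] or "/"
--             break
--     return normalized or "/"
-- ===== SOURCE B (Python) =====
-- _DEFAULT_PAGE_NAMES = {
--     "index",
--     "index.html",
--     "index.htm",
--     "default",
--     "default.html",
--     "default.htm",
--     "default.aspx",
-- }
--
-- def _normalize_canonical_path(path: str) -> str:
--     normalized = path or "/"
--     if normalized != "/" and normalized.endswith("/"):
--         normalized = normalized.rstrip("/")
--     head, sep, tail = normalized.rpartition("/")
--     if sep and tail.lower() in _DEFAULT_PAGE_NAMES: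
--         return head or "/"
--     return normalized or "/"
-- ===== Notes on version B (the rewrite author's own statement) =====
-- stated objective: simpler
-- what changed: Replaces A's whole-string root check plus a repeated endswith scan over the page-name set (and a negative-length slice) by a single rpartition at the last slash followed by one membership test on the lowered last segment.
import Mathlib
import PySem

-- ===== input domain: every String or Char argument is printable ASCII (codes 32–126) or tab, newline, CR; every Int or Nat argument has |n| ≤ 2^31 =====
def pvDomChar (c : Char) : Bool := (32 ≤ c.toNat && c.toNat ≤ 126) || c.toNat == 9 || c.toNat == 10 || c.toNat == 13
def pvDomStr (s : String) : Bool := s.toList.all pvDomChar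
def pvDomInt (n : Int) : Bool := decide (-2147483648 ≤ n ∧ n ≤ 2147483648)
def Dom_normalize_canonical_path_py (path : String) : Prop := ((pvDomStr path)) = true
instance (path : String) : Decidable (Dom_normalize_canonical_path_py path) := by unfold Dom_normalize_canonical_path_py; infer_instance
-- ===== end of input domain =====

-- B replaces A's endswith-scan over the page-name set by a single rpartition at the last '/'
-- plus one membership test (objective: simpler).

-- ===== PORT A =====
-- _DEFAULT_PAGE_NAMES: a Python set of distinct string constants; at most one element can match
-- A's endswith loop (proved below), so the fixed source order is a faithful iteration order.
def pvDefaultPageNames : List (List Char) :=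
  ["index".toList, "index.html".toList, "index.htm".toList, "default".toList,
   "default.html".toList, "default.htm".toList, "default.aspx".toList]

-- hand port of `s.rstrip("/")` (drop every trailing '/'); exact for a single-character strip set
def pvRstripSlash (cs : List Char) : List Char := ((cs.reverse).dropWhile (· == '/')).reverse

def normalize_canonical_path_py (path : String) : String :=
  let n0 := if path.toList.isEmpty then ['/'] else path.toList              -- normalized = path or "/"
  let normalized :=
    if n0 ≠ ['/'] ∧ PySem.Chars.endswith n0 ['/'] = true then pvRstripSlash n0 else n0
  let lowered := PySem.Chars.lower normalized
  if pvDefaultPageNames.any (fun p => lowered == '/' :: p) then "/"        -- lowered in {f"/{item}"}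
  else
    -- `for page_name in _DEFAULT_PAGE_NAMES: if lowered.endswith(...): ...; break` = first match
    let normalized' :=
      match pvDefaultPageNames.find? (fun p => PySem.Chars.endswith lowered ('/' :: p)) with
      | some p =>
          let cut := PySem.List.slice normalized none (some (-((p.length : Int) + 1)))
          if cut.isEmpty then ['/'] else cut                               -- normalized[:-(len+1)] or "/"
      | none => normalized
    String.ofList (if normalized'.isEmpty then ['/'] else normalized')          -- return normalized or "/"

-- ===== PORT B =====
-- hand port of `normalized.rpartition("/")`: some (head, tail) splits at the LAST '/',
-- none when no '/' occurs (Python's ("", "", s) case); exact for a single-character separator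
def pvRpartitionSlash : List Char → Option (List Char × List Char)
  | [] => none
  | c :: rest =>
    match pvRpartitionSlash rest with
    | some (h, t) => some (c :: h, t)
    | none => if c = '/' then some ([], rest) else none

def normalize_canonical_path_py_alt (path : String) : String :=
  let n0 := if path.toList.isEmpty then ['/'] else path.toList              -- normalized = path or "/"
  let normalized :=
    if n0 ≠ ['/'] ∧ PySem.Chars.endswith n0 ['/'] = true then pvRstripSlash n0 else n0
  match pvRpartitionSlash normalized with                                   -- head, sep, tail = rpartition
  | some (head, tail) =>
      if PySem.Chars.lower tail ∈ pvDefaultPageNames then                   -- sep and tail.lower() in names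
        String.ofList (if head.isEmpty then ['/'] else head)                    -- return head or "/"
      else String.ofList (if normalized.isEmpty then ['/'] else normalized)     -- return normalized or "/"
  | none => String.ofList (if normalized.isEmpty then ['/'] else normalized)

-- ===== PRECONDITION & SPEC =====
def Spec_normalize_canonical_path_py (path : String) (out : String) : Prop := out = normalize_canonical_path_py_alt path
instance (path : String) (out : String) : Decidable (Spec_normalize_canonical_path_py path out) := by unfold Spec_normalize_canonical_path_py; infer_instance

-- ===== CLAIM (what is proved, stated in full; the proofs are below) =====
def Claim_equal_normalize_canonical_path_py : Prop := ∀ (path : String), Dom_normalize_canonical_path_py path → Spec_normalize_canonical_path_py path (normalize_canonical_path_py path)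

-- ===== LEMMAS AND PROOFS =====

lemma pvLowerChar_slash {c : Char} (h : PySem.Chars.lowerChar c = '/') : c = '/' := by
  unfold PySem.Chars.lowerChar at h
  split at h
  · exfalso
    rename_i hu
    unfold PySem.Chars.isupper at hu
    simp only [Bool.and_eq_true, decide_eq_true_eq] at hu
    have hA : 65 ≤ c.toNat := by
      have := hu.1
      rw [Char.le_def, UInt32.le_iff_toNat_le] at this
      exact this
    have h2 := congrArg Char.toNat h
    rw [Char.toNat_ofNat, show ('/' : Char).toNat = 47 from rfl] at h2
    by_cases hv : (c.toNat + 32).isValidChar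
    · rw [if_pos hv] at h2; omega
    · rw [if_neg hv] at h2; omega
  · exact h

lemma pvMem_lower_slash {cs : List Char} (h : '/' ∈ PySem.Chars.lower cs) : '/' ∈ cs := by
  simp only [PySem.Chars.lower, List.mem_map] at h
  obtain ⟨c, hc, he⟩ := h
  exact (pvLowerChar_slash he) ▸ hc

lemma pvLower_append_slash (h t : List Char) :
    PySem.Chars.lower (h ++ '/' :: t) = PySem.Chars.lower h ++ '/' :: PySem.Chars.lower t := by
  simp only [PySem.Chars.lower, List.map_append, List.map_cons]
  norm_num [show PySem.Chars.lowerChar '/' = '/' from by decide]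

lemma pvRpart_none (cs : List Char) : pvRpartitionSlash cs = none ↔ '/' ∉ cs := by
  induction cs with
  | nil => simp [pvRpartitionSlash]
  | cons c rest ih =>
    simp only [pvRpartitionSlash]
    cases hr : pvRpartitionSlash rest with
    | some pr =>
      have hmem : '/' ∈ rest := by
        by_contra hn
        rw [← ih] at hn
        simp [hn] at hr
      simp [List.mem_cons, hmem]
    | none =>
      have hrest := ih.mp hr
      by_cases hc : c = '/'
      · simp [hc]
      · simp [hc, hrest, List.mem_cons, Ne.symm hc]

lemma pvRpart_some (cs : List Char) : ∀ h t, pvRpartitionSlash cs = some (h, t) →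
    cs = h ++ '/' :: t ∧ '/' ∉ t := by
  induction cs with
  | nil => intro h t hx; simp [pvRpartitionSlash] at hx
  | cons c rest ih =>
    intro h t hx
    simp only [pvRpartitionSlash] at hx
    cases hr : pvRpartitionSlash rest with
    | some pr =>
      rw [hr] at hx
      simp only [Option.some.injEq, Prod.mk.injEq] at hx
      obtain ⟨h1, h2⟩ := hx
      obtain ⟨hcs, hnt⟩ := ih pr.1 pr.2 (by rw [hr])
      subst h1; subst h2
      exact ⟨by rw [hcs, List.cons_append], hnt⟩
    | none =>
      rw [hr] at hx
      by_cases hc : c = '/'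
      · rw [if_pos hc] at hx
        simp only [Option.some.injEq, Prod.mk.injEq] at hx
        obtain ⟨h1, h2⟩ := hx
        subst h1; subst h2
        exact ⟨by rw [hc]; rfl, (pvRpart_none rest).mp hr⟩
      · rw [if_neg hc] at hx; exact absurd hx (by simp)

lemma pvNames_slashfree : ∀ p ∈ pvDefaultPageNames, '/' ∉ p := by decide

lemma pvSuffix_unique {l p q : List Char} (hp : '/' :: p <:+ l) (hq : '/' :: q <:+ l)
    (np : '/' ∉ p) (nq : '/' ∉ q) : p = q := by
  rcases List.suffix_or_suffix_of_suffix hp hq with h | h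
  · rcases List.suffix_cons_iff.mp h with he | h2
    · injection he
    · exact absurd (h2.subset (by simp)) nq
  · rcases List.suffix_cons_iff.mp h with he | h2
    · injection he with _ he'; exact he'.symm
    · exact absurd (h2.subset (by simp)) np

lemma pvSlice_cut (h t : List Char) :
    PySem.List.slice (h ++ '/' :: t) none (some (-((t.length : Int) + 1))) = h := by
  simp only [PySem.List.slice, PySem.List.clampIdx]
  have hlen : (h ++ '/' :: t).length = h.length + t.length + 1 := by
    simp [List.length_append]; omega
  rw [hlen]
  have hlt : (-((t.length : Int) + 1)) < 0 := by omega
  rw [if_pos hlt]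
  have hnn : ¬ (((h.length + t.length + 1 : Nat) : Int) + -((t.length : Int) + 1) < 0) := by
    push_cast; omega
  rw [if_neg hnn]
  have he : (((h.length + t.length + 1 : Nat) : Int) + -((t.length : Int) + 1)).toNat = h.length := by
    push_cast; omega
  rw [he]
  simp

-- the common core: after the shared normalization, A's root-check + endswith-loop equals
-- B's rpartition + membership test
lemma pvPost_eq (cs : List Char) :
    (if pvDefaultPageNames.any (fun p => PySem.Chars.lower cs == '/' :: p) then ("/" : String)
     else
       let normalized' :=
         match pvDefaultPageNames.find?
             (fun p => PySem.Chars.endswith (PySem.Chars.lower cs) ('/' :: p)) with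
         | some p =>
             let cut := PySem.List.slice cs none (some (-((p.length : Int) + 1)))
             if cut.isEmpty then ['/'] else cut
         | none => cs
       String.ofList (if normalized'.isEmpty then ['/'] else normalized')) =
    (match pvRpartitionSlash cs with
     | some (head, tail) =>
         if PySem.Chars.lower tail ∈ pvDefaultPageNames then
           String.ofList (if head.isEmpty then ['/'] else head)
         else String.ofList (if cs.isEmpty then ['/'] else cs)
     | none => String.ofList (if cs.isEmpty then ['/'] else cs)) := by
  cases hrp : pvRpartitionSlash cs with
  | none =>
    have hns : '/' ∉ cs := (pvRpart_none cs).mp hrp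
    have hnl : '/' ∉ PySem.Chars.lower cs := fun hm => hns (pvMem_lower_slash hm)
    have hany : (pvDefaultPageNames.any fun p => PySem.Chars.lower cs == '/' :: p) = false := by
      simp only [List.any_eq_false, beq_iff_eq]
      intro p _ he
      exact hnl (he ▸ List.mem_cons_self)
    have hfind : pvDefaultPageNames.find?
        (fun p => PySem.Chars.endswith (PySem.Chars.lower cs) ('/' :: p)) = none := by
      rw [List.find?_eq_none]
      intro p _
      simp only [PySem.Chars.endswith_iff]
      intro hsuf
      exact hnl (hsuf.subset List.mem_cons_self)
    simp [hany, hfind]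
  | some pr =>
    obtain ⟨head, tail⟩ := pr
    obtain ⟨hcs, hnt⟩ := pvRpart_some cs head tail hrp
    subst hcs
    have hlow := pvLower_append_slash head tail
    have hnt' : '/' ∉ PySem.Chars.lower tail := fun hm => hnt (pvMem_lower_slash hm)
    have hsuf : '/' :: PySem.Chars.lower tail <:+ PySem.Chars.lower (head ++ '/' :: tail) := by
      rw [hlow]; exact ⟨PySem.Chars.lower head, rfl⟩
    have huniq : ∀ p ∈ pvDefaultPageNames,
        PySem.Chars.endswith (PySem.Chars.lower (head ++ '/' :: tail)) ('/' :: p) = true →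
        p = PySem.Chars.lower tail := by
      intro p hp hend
      exact pvSuffix_unique ((PySem.Chars.endswith_iff _ _).mp hend) hsuf
        (pvNames_slashfree p hp) hnt'
    by_cases hmem : PySem.Chars.lower tail ∈ pvDefaultPageNames
    · by_cases hh : head = []
      · subst hh
        have hany : (pvDefaultPageNames.any
            fun p => PySem.Chars.lower ([] ++ '/' :: tail) == '/' :: p) = true := by
          refine List.any_eq_true.mpr ⟨PySem.Chars.lower tail, hmem, ?_⟩
          rw [pvLower_append_slash]
          simp [PySem.Chars.lower]
        rw [hany, if_pos rfl]
        simp [hmem]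
      · have hany : (pvDefaultPageNames.any
            fun p => PySem.Chars.lower (head ++ '/' :: tail) == '/' :: p) = false := by
          simp only [List.any_eq_false, beq_iff_eq]
          intro p hp he
          rcases head with _ | ⟨c, hs⟩
          · exact hh rfl
          · rw [pvLower_append_slash] at he
            simp only [PySem.Chars.lower, List.map_cons, List.cons_append, List.cons.injEq] at he
            exact pvNames_slashfree p hp
              (he.2 ▸ List.mem_append_right _ List.mem_cons_self)
        cases hfd : pvDefaultPageNames.find?
            (fun p => PySem.Chars.endswith (PySem.Chars.lower (head ++ '/' :: tail)) ('/' :: p)) with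
        | none =>
          exfalso
          have := List.find?_eq_none.mp hfd (PySem.Chars.lower tail) hmem
          exact this ((PySem.Chars.endswith_iff _ _).mpr hsuf)
        | some p =>
          have hpmem := List.mem_of_find?_eq_some hfd
          have hpe := List.find?_some
            (p := fun q => PySem.Chars.endswith (PySem.Chars.lower (head ++ '/' :: tail)) ('/' :: q)) hfd
          have hpt : p = PySem.Chars.lower tail := huniq p hpmem hpe
          have hplen : (p.length : Int) = (tail.length : Int) := by
            rw [hpt]; simp [PySem.Chars.lower]
          have hslice := pvSlice_cut head tail
          simp only [hany, Bool.false_eq_true, if_false, hplen, hslice]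
          have hne : head.isEmpty = false := by
            cases head with
            | nil => exact absurd rfl hh
            | cons _ _ => rfl
          simp [hne, hmem]
    · have hany : (pvDefaultPageNames.any
          fun p => PySem.Chars.lower (head ++ '/' :: tail) == '/' :: p) = false := by
        simp only [List.any_eq_false, beq_iff_eq]
        intro p hp he
        rw [pvLower_append_slash] at he
        rcases head with _ | ⟨c, hs⟩
        · simp only [PySem.Chars.lower, List.map_nil, List.nil_append, List.cons.injEq] at he
          have hq : p = PySem.Chars.lower tail := he.2.symm
          exact hmem (hq ▸ hp)
        · simp only [PySem.Chars.lower, List.map_cons, List.cons_append, List.cons.injEq] at he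
          exact pvNames_slashfree p hp
            (he.2 ▸ List.mem_append_right _ List.mem_cons_self)
      have hfind : pvDefaultPageNames.find?
          (fun p => PySem.Chars.endswith (PySem.Chars.lower (head ++ '/' :: tail)) ('/' :: p)) = none := by
        rw [List.find?_eq_none]
        intro p hp
        simp only [Bool.not_eq_true]
        by_contra hb
        rw [Bool.not_eq_false] at hb
        exact hmem (huniq p hp hb ▸ hp)
      simp [hany, hfind, hmem]

-- ===== VERDICT (by name: the statement is the Claim_ definition above) =====
theorem normalize_canonical_path_py_spec : Claim_equal_normalize_canonical_path_py := by
  intro path _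
  show normalize_canonical_path_py path = normalize_canonical_path_py_alt path
  unfold normalize_canonical_path_py normalize_canonical_path_py_alt
  exact pvPost_eq _
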